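-- pv_equiv track=rewrite | github.com/abdulmajid100/multi-agv-coordination | graph_nav3.py | state_to_index
-- ===== SOURCE A (Python) =====
-- def state_to_index(state, node_to_index, num_agents):
--     index = 0
--     num_nodes = len(node_to_index)
--     factor = num_nodes ** (num_agents - 1)
--     for i in range(num_agents):
--         node = tuple(state[i])  # Ensure state[i] is a tuple
--         node_idx = node_to_index[node]
--         index += node_idx * factor
--         if i < num_agents - 1:
--             factor //= num_nodes
--     return index
-- ===== SOURCE B (Python) =====
-- def state_to_index(state, node_to_index, num_agents):
--     # Staged decomposition: (1) one pass extracts the digit sequence,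
--     # (2) a recursive helper converts the digit list to its base-num_nodes value.
--     digits = [node_to_index[tuple(state[i])] for i in range(num_agents)]
--     num_nodes = len(node_to_index)
--
--     def value(k):
--         # value of the prefix digits[:k] in base num_nodes
--         if k == 0:
--             return 0
--         return value(k - 1) * num_nodes + digits[k - 1]
--
--     return value(len(digits))
-- ===== Notes on version B (the rewrite author's own statement) =====
-- stated objective: simpler
-- what changed: Replaces A's single loop that maintains a precomputed power factor = num_nodes**(num_agents-1) with running floor-division and a branch by a two-stage decomposition: first extract the digit list, then a recursive helper converts that list to its base-num_nodes value.
-- crash fix: On num_agents <= 0 with an empty node_to_index, A raises ZeroDivisionError (0 ** negative exponent); B returns 0 since the digit list is empty. — e.g. on state_to_index([], [], 0): A raises ZeroDivisionError, B returns 0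
import Mathlib
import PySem

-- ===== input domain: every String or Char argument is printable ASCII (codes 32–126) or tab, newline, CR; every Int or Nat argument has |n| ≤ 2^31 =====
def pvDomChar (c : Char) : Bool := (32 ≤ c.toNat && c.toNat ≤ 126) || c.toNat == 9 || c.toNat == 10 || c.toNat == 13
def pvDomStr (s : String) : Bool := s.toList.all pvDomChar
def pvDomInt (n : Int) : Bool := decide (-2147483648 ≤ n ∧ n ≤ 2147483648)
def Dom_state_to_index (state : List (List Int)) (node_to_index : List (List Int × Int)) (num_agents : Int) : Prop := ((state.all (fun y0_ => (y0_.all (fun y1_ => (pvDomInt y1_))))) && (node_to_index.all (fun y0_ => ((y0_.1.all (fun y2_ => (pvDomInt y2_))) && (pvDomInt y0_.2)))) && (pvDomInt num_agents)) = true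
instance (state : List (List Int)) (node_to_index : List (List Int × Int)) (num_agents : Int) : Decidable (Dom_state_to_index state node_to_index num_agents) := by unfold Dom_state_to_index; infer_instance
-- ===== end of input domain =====

-- B replaces A's single loop (precomputed power, running floor-division, branch) by a two-stage
-- decomposition: extract the digit list, then convert it recursively (simpler; same O(num_agents) cost).

-- ===== PORT A =====
def state_to_index (state : List (List Int)) (node_to_index : List (List Int × Int)) (num_agents : Int) : Int :=
  let num_nodes : Int := node_to_index.length
  -- Python's ** with a negative exponent yields a float (ZeroDivisionError for num_nodes = 0); both cases are
  -- outside Pre_ or leave factor unused (empty loop), so the integer power used when num_agents ≥ 1 is exact here.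
  let factor : Int := num_nodes ^ (num_agents - 1).toNat
  (((PySem.List.pyRange 0 num_agents 1).foldl
    (fun (p : Int × Int) i =>
      let node := (PySem.List.pyGet? state i).getD []        -- state[i]; IndexError excluded by Pre_
      let node_idx := (List.lookup node node_to_index).getD 0 -- dict lookup; KeyError excluded by Pre_
      (p.1 + node_idx * p.2,
       if i < num_agents - 1 then PySem.Int.floordiv p.2 num_nodes else p.2))
    (0, factor)) : Int × Int).1

-- ===== PORT B =====
-- inner helper 'value(k)': value of the prefix digits[:k] in base num_nodes
def stiValue (digits : List Int) (num_nodes : Int) : Nat → Int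
  | 0 => 0
  | k + 1 => stiValue digits num_nodes k * num_nodes + (PySem.List.pyGet? digits (k : Int)).getD 0

def state_to_index_alt (state : List (List Int)) (node_to_index : List (List Int × Int)) (num_agents : Int) : Int :=
  let digits : List Int :=
    (PySem.List.pyRange 0 num_agents 1).map
      (fun i => (List.lookup ((PySem.List.pyGet? state i).getD []) node_to_index).getD 0)
  let num_nodes : Int := node_to_index.length
  stiValue digits num_nodes digits.length

-- ===== PRECONDITION & SPEC =====
-- Pre_ excludes exactly the inputs on which A raises: ZeroDivisionError (num_agents ≤ 0 with an empty dict),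
-- IndexError (num_agents > len(state)), or KeyError (some visited state[i] missing from node_to_index).
def Pre_state_to_index (state : List (List Int)) (node_to_index : List (List Int × Int)) (num_agents : Int) : Prop :=
  if num_agents ≤ 0 then node_to_index ≠ []
  else num_agents ≤ (state.length : Int) ∧
       ∀ x ∈ state.take num_agents.toNat, x ∈ node_to_index.map Prod.fst
instance (state : List (List Int)) (node_to_index : List (List Int × Int)) (num_agents : Int) : Decidable (Pre_state_to_index state node_to_index num_agents) := by unfold Pre_state_to_index; infer_instance

def pvWitness_state_to_index : List (List Int) × (List (List Int × Int)) × Int :=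
  ([[1, 2], [3], [1, 2]], [([1, 2], 0), ([3], 1)], 3)

-- A raises ZeroDivisionError when num_agents ≤ 0 and node_to_index is empty (0 ** negative); B returns 0 there.
def Raises_state_to_index (state : List (List Int)) (node_to_index : List (List Int × Int)) (num_agents : Int) : Prop :=
  num_agents ≤ 0 ∧ node_to_index = []
instance (state : List (List Int)) (node_to_index : List (List Int × Int)) (num_agents : Int) : Decidable (Raises_state_to_index state node_to_index num_agents) := by unfold Raises_state_to_index; infer_instance
def pvRaiseWitness_state_to_index : List (List Int) × (List (List Int × Int)) × Int := ([], [], 0)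
def pvRaiseWitnessOut_state_to_index : Int := 0

def Spec_state_to_index (state : List (List Int)) (node_to_index : List (List Int × Int)) (num_agents : Int) (out : Int) : Prop := out = state_to_index_alt state node_to_index num_agents
instance (state : List (List Int)) (node_to_index : List (List Int × Int)) (num_agents : Int) (out : Int) : Decidable (Spec_state_to_index state node_to_index num_agents out) := by unfold Spec_state_to_index; infer_instance

-- ===== CLAIM (what is proved, stated in full; the proofs are below) =====
def Claim_equal_state_to_index : Prop := ∀ (state : List (List Int)) (node_to_index : List (List Int × Int)) (num_agents : Int), Dom_state_to_index state node_to_index num_agents → Pre_state_to_index state node_to_index num_agents → Spec_state_to_index state node_to_index num_agents (state_to_index state node_to_index num_agents)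
def Claim_raises_state_to_index : Prop := (∀ (state : List (List Int)) (node_to_index : List (List Int × Int)) (num_agents : Int), Dom_state_to_index state node_to_index num_agents → Raises_state_to_index state node_to_index num_agents → ¬ Pre_state_to_index state node_to_index num_agents) ∧ (Dom_state_to_index (pvRaiseWitness_state_to_index.1) (pvRaiseWitness_state_to_index.2.1) (pvRaiseWitness_state_to_index.2.2) ∧ Raises_state_to_index (pvRaiseWitness_state_to_index.1) (pvRaiseWitness_state_to_index.2.1) (pvRaiseWitness_state_to_index.2.2) ∧ state_to_index_alt (pvRaiseWitness_state_to_index.1) (pvRaiseWitness_state_to_index.2.1) (pvRaiseWitness_state_to_index.2.2) = pvRaiseWitnessOut_state_to_index)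

-- ===== LEMMAS AND PROOFS =====

-- Horner fold started from c equals c * m^len plus the fold started from 0.
theorem horner_shift (d : Int → Int) (m : Int) :
    ∀ (l : List Int) (c : Int),
      l.foldl (fun acc i => acc * m + d i) c
        = c * m ^ l.length + l.foldl (fun acc i => acc * m + d i) 0 := by
  intro l
  induction l with
  | nil => intro c; simp
  | cons x xs ih =>
      intro c
      simp only [List.foldl_cons, List.length_cons]
      rw [ih (c * m + d x), ih (0 * m + d x)]
      ring

theorem floordiv_pow_succ (m : Int) (hm : m ≠ 0) (n : Nat) :
    PySem.Int.floordiv (m ^ (n + 1)) m = m ^ n := by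
  have hmod : PySem.Int.mod (m ^ (n + 1)) m = 0 := by
    rw [PySem.Int.mod_eq_zero_iff_dvd]
    exact Dvd.intro (m ^ n) (by ring)
  have h := PySem.Int.floordiv_mul_add_mod (m ^ (n + 1)) m
  rw [hmod, add_zero] at h
  have : PySem.Int.floordiv (m ^ (n + 1)) m * m = m ^ n * m := by
    rw [h]; ring
  exact mul_right_cancel₀ hm this

-- A's pair fold (accumulator + descending factor) agrees with a left Horner fold over the same range.
theorem key_lemma (d : Int → Int) (m na : Int) (hm : m ≠ 0) :
    ∀ (n : Nat) (a ix : Int), a + n = na →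
      ((PySem.List.pyRange a na 1).foldl
        (fun (p : Int × Int) i =>
          (p.1 + d i * p.2, if i < na - 1 then PySem.Int.floordiv p.2 m else p.2))
        (ix, m ^ (n - 1))).1
      = ix + (PySem.List.pyRange a na 1).foldl (fun acc i => acc * m + d i) 0 := by
  intro n
  induction n with
  | zero =>
      intro a ix h
      rw [PySem.List.pyRange_one_eq_nil (by omega)]
      simp
  | succ k ih =>
      intro a ix h
      rw [PySem.List.pyRange_one_cons (by omega)]
      simp only [List.foldl_cons]
      rcases Nat.eq_zero_or_pos k with hk | hk
      · subst hk
        rw [PySem.List.pyRange_one_eq_nil (by omega)]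
        simp
      · have hlt : a < na - 1 := by omega
        have hfac : (if a < na - 1 then PySem.Int.floordiv (m ^ (k + 1 - 1)) m else m ^ (k + 1 - 1)) = m ^ (k - 1) := by
          rw [if_pos hlt]
          have : k + 1 - 1 = (k - 1) + 1 := by omega
          rw [this, floordiv_pow_succ m hm]
        rw [hfac]
        rw [ih (a + 1) (ix + d a * m ^ (k + 1 - 1)) (by omega)]
        rw [horner_shift d m _ (0 * m + d a)]
        have hlen : (PySem.List.pyRange (a + 1) na 1).length = k := by
          rw [PySem.List.length_pyRange_one]; omega
        rw [hlen]
        have hk1 : k + 1 - 1 = k := by omega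
        rw [hk1]
        ring

-- B's recursive converter on a prefix equals the left Horner fold over that prefix.
theorem stiValue_eq_foldl (digits : List Int) (m : Int) :
    ∀ k : Nat, k ≤ digits.length →
      stiValue digits m k = (digits.take k).foldl (fun acc d => acc * m + d) 0 := by
  intro k
  induction k with
  | zero => intro _; simp [stiValue]
  | succ j ih =>
      intro hk
      have hj : j < digits.length := by omega
      rw [stiValue, ih (by omega)]
      have htake : List.take (j + 1) digits = List.take j digits ++ [digits[j]] := by
        rw [List.take_add_one, List.getElem?_eq_getElem hj]; rfl
      rw [PySem.List.pyGet?_natCast, htake, List.foldl_append]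
      simp [List.getElem?_eq_getElem hj]

theorem pre_nonempty (state : List (List Int)) (node_to_index : List (List Int × Int)) (num_agents : Int)
    (hpre : Pre_state_to_index state node_to_index num_agents) : node_to_index ≠ [] := by
  unfold Pre_state_to_index at hpre
  by_cases hna : num_agents ≤ 0
  · rw [if_pos hna] at hpre; exact hpre
  · rw [if_neg hna] at hpre
    obtain ⟨hlen, hmem⟩ := hpre
    have hstate : state.take num_agents.toNat ≠ [] := by
      intro hnil
      have := List.length_eq_zero_iff.mpr hnil
      rw [List.length_take] at this
      omega
    obtain ⟨x, hx⟩ := List.exists_mem_of_ne_nil _ hstate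
    have := hmem x hx
    intro hnil
    simp [hnil] at this

-- ===== VERDICT (by name: the statement is the Claim_ definition above) =====
theorem state_to_index_spec : Claim_equal_state_to_index := by
  intro state node_to_index num_agents _ hpre
  unfold Spec_state_to_index state_to_index state_to_index_alt
  simp only []
  have hm : (node_to_index.length : Int) ≠ 0 := by
    have := pre_nonempty state node_to_index num_agents hpre
    simpa using this
  set f : Int → Int :=
    fun i => (List.lookup ((PySem.List.pyGet? state i).getD []) node_to_index).getD 0 with hf
  rw [stiValue_eq_foldl _ _ _ (le_refl _), List.take_length, List.foldl_map]
  by_cases hna : num_agents ≤ 0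
  · rw [PySem.List.pyRange_one_eq_nil (by omega)]
    simp
  · have hcast : (num_agents - 1).toNat = num_agents.toNat - 1 := by omega
    rw [hcast]
    have := key_lemma f (node_to_index.length : Int) num_agents hm num_agents.toNat 0 0 (by omega)
    simpa using this

@[simp] theorem state_to_index_raises : Claim_raises_state_to_index := by
  unfold Claim_raises_state_to_index
  constructor
  · intro state node_to_index num_agents _ hr
    unfold Pre_state_to_index
    rw [if_pos hr.1]
    simp [hr.2]
  · exact ⟨by decide, by decide, by decide⟩
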